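-- pv_equiv track=rewrite | github.com/bramlefebvre/frenetic_neural_networks | find_hamilton_cycle.py | _check_first_vertex_of_remaining_path
-- ===== SOURCE A (Python) =====
-- def _check_first_vertex_of_remaining_path(tournament, cycle, vertex_to_insert):
--     result = _check_first_vertex_of_remaining_path_against_first_vertex_of_cycle(tournament, cycle, vertex_to_insert)
--     if result.fits_before:
--         return 0
--     encountered_dominating_vertex = not result.dominates
--     for index, vertex_in_cycle in enumerate(cycle[1:]):
--         dominates = tournament[vertex_to_insert][vertex_in_cycle] == 1
--         if dominates:
--             if encountered_dominating_vertex: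
--                 return index
--         else:
--             encountered_dominating_vertex = True
--
-- def _check_first_vertex_of_remaining_path_against_first_vertex_of_cycle(tournament, cycle, vertex_to_insert):
--     dominates = tournament[vertex_to_insert][cycle[0]] == 1
--     fits_before = False
--     if dominates and tournament[cycle[-1]][vertex_to_insert] == 1:
--         fits_before = True
--     return CheckFirstVertexOfRemainingPathAgainstFirstVertexOfCycleResult(dominates, fits_before)
--
-- class CheckFirstVertexOfRemainingPathAgainstFirstVertexOfCycleResult:
--     def __init__(self, dominates, fits_before):
--         self.dominates = dominates
--         self.fits_before = fits_before
-- ===== SOURCE B (Python) =====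
-- def _check_first_vertex_of_remaining_path(tournament, cycle, vertex_to_insert):
--     row = tournament[vertex_to_insert]
--     if row[cycle[0]] == 1 and tournament[cycle[-1]][vertex_to_insert] == 1:
--         return 0
--     # phase 1: first cycle position the vertex does NOT dominate
--     p = next((i for i, x in enumerate(cycle) if row[x] != 1), None)
--     if p is None:
--         return None
--     # phase 2: first later position the vertex DOES dominate; insert just before it
--     k = next((k for k in range(p + 1, len(cycle)) if row[cycle[k]] == 1), None)
--     return None if k is None else k - 1
-- ===== Notes on version B (the rewrite author's own statement) =====
-- stated objective: simpler
-- what changed: A's helper-object result and flag-carrying single pass over cycle[1:] are replaced by an inlined fits-before test plus a two-phase search: first the earliest cycle position the vertex does not dominate, then the first later position it does dominate, returning that index minus 1.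
-- outside the precondition, e.g. on _check_first_vertex_of_remaining_path([[0, 0], []], [1], 0): A returns None, B returns None
import Mathlib
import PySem

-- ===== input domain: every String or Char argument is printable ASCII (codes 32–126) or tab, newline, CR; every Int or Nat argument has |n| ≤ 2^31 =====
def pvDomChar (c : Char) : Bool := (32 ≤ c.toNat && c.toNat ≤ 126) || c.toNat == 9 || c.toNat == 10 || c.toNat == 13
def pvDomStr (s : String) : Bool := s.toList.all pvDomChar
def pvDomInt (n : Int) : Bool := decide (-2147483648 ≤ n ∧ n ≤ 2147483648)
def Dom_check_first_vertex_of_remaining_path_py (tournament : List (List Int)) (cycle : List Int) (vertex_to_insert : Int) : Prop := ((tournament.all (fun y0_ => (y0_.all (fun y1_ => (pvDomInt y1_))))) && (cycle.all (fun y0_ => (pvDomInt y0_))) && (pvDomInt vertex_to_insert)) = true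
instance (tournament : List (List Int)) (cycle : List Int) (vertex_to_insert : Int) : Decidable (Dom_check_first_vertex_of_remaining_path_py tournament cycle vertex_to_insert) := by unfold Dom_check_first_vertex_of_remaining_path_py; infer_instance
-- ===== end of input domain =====

-- B replaces A's helper object + flag-carrying single pass by one inlined fits-before test and a
-- two-phase search (first non-dominated position, then first dominated position after it); objective: simpler.

-- ===== PORT A =====
-- A's for-loop over cycle[1:] with the encountered_dominating_vertex flag and enumerate index
def loopA_cfv (row : List Int) (l : List Int) (enc : Bool) (idx : Nat) : Option Int :=
  match l with
  | [] => none
  | x :: rest =>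
    let dominates := PySem.List.pyGetD row x 0 == 1
    if dominates then
      if enc then some (idx : Int) else loopA_cfv row rest enc (idx + 1)
    else loopA_cfv row rest true (idx + 1)

def check_first_vertex_of_remaining_path_py (tournament : List (List Int)) (cycle : List Int) (vertex_to_insert : Int) : Option Int :=
  -- helper _check_first_vertex_of_remaining_path_against_first_vertex_of_cycle, inlined as its two fields
  let dominates := PySem.List.pyGetD (PySem.List.pyGetD tournament vertex_to_insert []) (PySem.List.pyGetD cycle 0 0) 0 == 1
  let fits_before := dominates && (PySem.List.pyGetD (PySem.List.pyGetD tournament (PySem.List.pyGetD cycle (-1) 0) []) vertex_to_insert 0 == 1)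
  if fits_before then some 0
  else loopA_cfv (PySem.List.pyGetD tournament vertex_to_insert []) (cycle.drop 1) (!dominates) 0

-- ===== PORT B =====
-- phase 1 of Source B: first index i (over the whole cycle) with row[cycle[i]] != 1
def findP_cfv (row : List Int) (l : List Int) (i : Nat) : Option Nat :=
  match l with
  | [] => none
  | x :: xs => if PySem.List.pyGetD row x 0 == 1 then findP_cfv row xs (i + 1) else some i

-- phase 2 of Source B: first index k ≥ start with row[cycle[k]] == 1, scanning cycle.drop start
def findK_cfv (row : List Int) (l : List Int) (i : Nat) : Option Nat :=
  match l with
  | [] => none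
  | x :: xs => if PySem.List.pyGetD row x 0 == 1 then some i else findK_cfv row xs (i + 1)

def check_first_vertex_of_remaining_path_py_alt (tournament : List (List Int)) (cycle : List Int) (vertex_to_insert : Int) : Option Int :=
  let row := PySem.List.pyGetD tournament vertex_to_insert []
  if (PySem.List.pyGetD row (PySem.List.pyGetD cycle 0 0) 0 == 1) && (PySem.List.pyGetD (PySem.List.pyGetD tournament (PySem.List.pyGetD cycle (-1) 0) []) vertex_to_insert 0 == 1) then some 0
  else
    match findP_cfv row cycle 0 with
    | none => none
    | some p =>
      match findK_cfv row (cycle.drop (p + 1)) (p + 1) with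
      | none => none
      | some k => some ((k : Int) - 1)

-- ===== PRECONDITION & SPEC =====
-- Pre_ requires every index either program could touch to be valid Python indexing
-- (cycle nonempty; tournament[vertex_to_insert] exists; every cycle vertex indexes that row;
-- tournament[cycle[-1]][vertex_to_insert] exists). It is slightly narrower than A's exact
-- non-raising set: A may return before performing some of these lookups (laziness / early return).
def preB_cfv (tournament : List (List Int)) (cycle : List Int) (vertex_to_insert : Int) : Bool :=
  !cycle.isEmpty &&
  (match PySem.List.pyGet? tournament vertex_to_insert with
   | none => false
   | some row => cycle.all (fun x => decide (PySem.Raise.InRange row.length x))) &&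
  (match (PySem.List.pyGet? cycle (-1)).bind (fun lv => PySem.List.pyGet? tournament lv) with
   | none => false
   | some lrow => decide (PySem.Raise.InRange lrow.length vertex_to_insert))

def Pre_check_first_vertex_of_remaining_path_py (tournament : List (List Int)) (cycle : List Int) (vertex_to_insert : Int) : Prop :=
  preB_cfv tournament cycle vertex_to_insert = true
instance (tournament : List (List Int)) (cycle : List Int) (vertex_to_insert : Int) : Decidable (Pre_check_first_vertex_of_remaining_path_py tournament cycle vertex_to_insert) := by unfold Pre_check_first_vertex_of_remaining_path_py; infer_instance

def pvWitness_check_first_vertex_of_remaining_path_py : List (List Int) × List Int × Int := ([[0, 1], [1, 0]], [0, 1], 1)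

def Spec_check_first_vertex_of_remaining_path_py (tournament : List (List Int)) (cycle : List Int) (vertex_to_insert : Int) (out : Option Int) : Prop := out = check_first_vertex_of_remaining_path_py_alt tournament cycle vertex_to_insert
instance (tournament : List (List Int)) (cycle : List Int) (vertex_to_insert : Int) (out : Option Int) : Decidable (Spec_check_first_vertex_of_remaining_path_py tournament cycle vertex_to_insert out) := by unfold Spec_check_first_vertex_of_remaining_path_py; infer_instance

-- ===== CLAIM (what is proved, stated in full; the proofs are below) =====
def Claim_equal_check_first_vertex_of_remaining_path_py : Prop := ∀ (tournament : List (List Int)) (cycle : List Int) (vertex_to_insert : Int), Dom_check_first_vertex_of_remaining_path_py tournament cycle vertex_to_insert → Pre_check_first_vertex_of_remaining_path_py tournament cycle vertex_to_insert → Spec_check_first_vertex_of_remaining_path_py tournament cycle vertex_to_insert (check_first_vertex_of_remaining_path_py tournament cycle vertex_to_insert)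

-- ===== LEMMAS AND PROOFS =====

theorem findP_cfv_ge (row : List Int) : ∀ (l : List Int) (i p : Nat), findP_cfv row l i = some p → i ≤ p := by
  intro l
  induction l with
  | nil => intro i p h; simp [findP_cfv] at h
  | cons x xs ih =>
    intro i p h
    simp only [findP_cfv] at h
    split at h
    · exact Nat.le_of_succ_le (ih (i + 1) p h)
    · exact Nat.le_of_eq (Option.some.inj h)

theorem loopA_true_eq (row : List Int) : ∀ (l : List Int) (i : Nat),
    loopA_cfv row l true i = (findK_cfv row l (i + 1)).map (fun k => (k : Int) - 1) := by
  intro l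
  induction l with
  | nil => intro i; rfl
  | cons x xs ih =>
    intro i
    by_cases hx : (PySem.List.pyGetD row x 0 == 1) = true
    · simp only [loopA_cfv, findK_cfv, hx, if_pos]
      simp
    · have hx' : (PySem.List.pyGetD row x 0 == 1) = false := by simpa using hx
      simp only [loopA_cfv, findK_cfv, hx', Bool.false_eq_true, if_false]
      exact ih (i + 1)

theorem loopA_false_eq (row : List Int) : ∀ (l : List Int) (i : Nat),
    loopA_cfv row l false i =
      (match findP_cfv row l (i + 1) with
       | none => none
       | some p => (findK_cfv row (l.drop (p - i)) (p + 1)).map (fun k => (k : Int) - 1)) := by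
  intro l
  induction l with
  | nil => intro i; rfl
  | cons x xs ih =>
    intro i
    by_cases hx : (PySem.List.pyGetD row x 0 == 1) = true
    · simp only [loopA_cfv, findP_cfv, hx, if_pos, Bool.false_eq_true, if_false]
      rw [ih (i + 1)]
      cases hp : findP_cfv row xs (i + 1 + 1) with
      | none => rfl
      | some p =>
        have hge := findP_cfv_ge row xs (i + 1 + 1) p hp
        have hdrop : p - i = (p - (i + 1)) + 1 := by omega
        simp only [hdrop, List.drop_succ_cons]
    · have hx' : (PySem.List.pyGetD row x 0 == 1) = false := by simpa using hx
      simp only [loopA_cfv, findP_cfv, hx', Bool.false_eq_true, if_false]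
      rw [loopA_true_eq]
      have h1 : i + 1 - i = 1 := by omega
      simp [h1]

-- ===== VERDICT (by name: the statement is the Claim_ definition above) =====
theorem check_first_vertex_of_remaining_path_py_spec : Claim_equal_check_first_vertex_of_remaining_path_py := by
  intro tournament cycle vertex_to_insert _hdom _hpre
  unfold Spec_check_first_vertex_of_remaining_path_py
  unfold check_first_vertex_of_remaining_path_py check_first_vertex_of_remaining_path_py_alt
  dsimp only
  split
  · rfl
  · cases cycle with
    | nil => rfl
    | cons c0 rest =>
      rw [PySem.List.pyGetD_zero_cons]
      by_cases hd : (PySem.List.pyGetD (PySem.List.pyGetD tournament vertex_to_insert []) c0 0 == 1) = true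
      · rw [hd]
        simp only [Bool.not_true, List.drop_one, List.tail_cons]
        rw [loopA_false_eq]
        simp only [findP_cfv, hd, if_pos, Nat.zero_add, Nat.sub_zero]
        cases hp : findP_cfv (PySem.List.pyGetD tournament vertex_to_insert []) rest 1 with
        | none => rfl
        | some p =>
          simp only [List.drop_succ_cons]
          cases findK_cfv (PySem.List.pyGetD tournament vertex_to_insert []) (List.drop p rest) (p + 1) <;> simp
      · have hd' : (PySem.List.pyGetD (PySem.List.pyGetD tournament vertex_to_insert []) c0 0 == 1) = false := by
          simpa using hd
        rw [hd']
        simp only [Bool.not_false, List.drop_one, List.tail_cons]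
        rw [loopA_true_eq]
        simp only [findP_cfv, hd', Bool.false_eq_true, if_false, Nat.zero_add, List.drop_succ_cons, List.drop_zero]
        cases findK_cfv (PySem.List.pyGetD tournament vertex_to_insert []) rest 1 <;> simp
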